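-- pv_equiv track=rewrite | github.com/polancka/subset_sum_algorithms | subset_sum.py | subset_sum_bfs_pruned
-- ===== SOURCE A (Python) =====
-- def subset_sum_bfs_pruned(n, k, a):
--     current = set([0])
--     for num in a:
--         next_layer = set()
--         for val in current:
--             new_val = val + num
--             if new_val <= k:
--                 next_layer.add(new_val)
--         current |= next_layer
--     return max(current)
-- ===== SOURCE B (Python) =====
-- def subset_sum_bfs_pruned(n, k, a):
--     # Value-major worklist search: instead of sweeping a growing set of sums once
--     # per element, expand each reached sum over the elements it can still take,
--     # scanning only the index segment not already covered for that sum.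
--     m = len(a)
--     first = {0: 0}        # reached sum -> smallest index it can still take elements from
--     todo = [(0, 0, m)]    # worklist of (sum, scan start, scan end); todo[head:] is pending
--     head = 0
--     best = 0
--     while head < len(todo):
--         v, s, e = todo[head]
--         head += 1
--         if best < v:
--             best = v
--         for j in range(s, e):
--             w = v + a[j]
--             if w <= k:
--                 old = first.get(w, m + 1)
--                 if j + 1 < old:
--                     first[w] = j + 1
--                     todo.append((w, j + 1, old if old <= m else m))
--     return best
-- ===== Notes on version B (the rewrite author's own statement) =====
-- stated objective: alternative
-- what changed: A sweeps a growing set of reachable sums once per list element (element-major layered set DP); B runs a value-major worklist search: each reached sum is expanded over the index segment of elements it can still take, with a dict recording per sum the smallest not-yet-covered start index, and the maximum is tracked incrementally.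
import Mathlib
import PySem

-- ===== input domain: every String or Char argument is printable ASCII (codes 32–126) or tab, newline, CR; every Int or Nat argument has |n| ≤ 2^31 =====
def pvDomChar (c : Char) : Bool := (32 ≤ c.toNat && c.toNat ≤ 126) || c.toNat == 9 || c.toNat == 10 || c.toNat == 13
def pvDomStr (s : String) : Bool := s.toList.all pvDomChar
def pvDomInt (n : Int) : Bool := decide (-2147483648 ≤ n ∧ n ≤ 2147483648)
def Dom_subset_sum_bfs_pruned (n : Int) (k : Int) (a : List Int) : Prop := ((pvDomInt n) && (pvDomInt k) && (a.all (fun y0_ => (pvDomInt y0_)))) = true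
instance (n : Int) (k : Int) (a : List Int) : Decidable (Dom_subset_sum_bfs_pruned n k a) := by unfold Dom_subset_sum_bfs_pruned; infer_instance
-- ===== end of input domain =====

-- B replaces A's element-major layered-set DP (sweep the whole set of reachable sums once
-- per element) by a value-major worklist search: each reached sum is expanded over the
-- index segment of elements it can still take, a dict keeps per sum the smallest
-- not-yet-covered start index, and the maximum is tracked incrementally (objective: alternative).

-- ===== PORT A =====
-- literal transliteration of A: a set of reachable sums, extended layer by layer
def subset_sum_bfs_pruned (n : Int) (k : Int) (a : List Int) : Int :=
  let current : PySem.Set Int :=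
    a.foldl (fun current num =>
      let next_layer : PySem.Set Int :=
        current.foldl (fun nl val =>
          let new_val := val + num
          if new_val ≤ k then PySem.Set.add nl new_val else nl) PySem.Set.empty
      PySem.Set.union current next_layer) (PySem.Set.ofList [0])
  -- max(current): the set always contains 0, so it is never empty and the default is never used
  (PySem.List.max? current (fun x => x)).getD 0

-- ===== PORT B =====
-- Take-chain reachability: `TRch k a v s` says the sum v is reached by taking elements at
-- strictly increasing indices (every new partial sum pruned at k), the last take ending at
-- index s.  Used by B's termination measure/invariant and by the proofs below.
inductive TRch (k : Int) (a : List Int) : Int → Int → Prop where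
  | zero : TRch k a 0 0
  | take (v s j : Int) (hv : TRch k a v s) (hs : s ≤ j) (hj : j + 1 ≤ (a.length : Int))
      (hk : v + PySem.List.pyGetD a j 0 ≤ k) :
      TRch k a (v + PySem.List.pyGetD a j 0) (j + 1)

-- total magnitude of negative / positive entries (bounds every take-chain sum)
def tNeg (a : List Int) : Int := (a.map (fun x => if x < 0 then -x else 0)).sum
def tPos (a : List Int) : Int := (a.map (fun x => if 0 < x then x else 0)).sum

-- termination potential of B's dict: sum of its start indices over the box of chain sums
def phiB (a : List Int) (first : PySem.Dict Int Int) : Nat :=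
  ((PySem.List.pyRange (-(tNeg a)) (tPos a + 1) 1).map
    (fun w => (first.getD w ((a.length : Int) + 1)).toNat)).sum

-- the body of Source B's inner `for j in range(s, e)` loop
def bStep (k : Int) (a : List Int) (v : Int)
    (st : PySem.Dict Int Int × List (Int × Int × Int)) (j : Int) :
    PySem.Dict Int Int × List (Int × Int × Int) :=
  let m : Int := (a.length : Int)
  let w := v + PySem.List.pyGetD a j 0
  if w ≤ k then
    let old := st.1.getD w (m + 1)
    if j + 1 < old then
      (st.1.insert w (j + 1), st.2 ++ [(w, j + 1, if old ≤ m then old else m)])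
    else st
  else st

-- Source B's inner `for j in range(s, e)` loop (pushes are buffered, appended to the worklist)
def bExpand (k : Int) (a : List Int) (v s e : Int)
    (st : PySem.Dict Int Int × List (Int × Int × Int)) :
    PySem.Dict Int Int × List (Int × Int × Int) :=
  (PySem.List.pyRange s e 1).foldl (bStep k a v) st

-- loop invariant needed for termination: dict entries are valid chain sums/starts, pending
-- entries are reached sums with in-range segments
def BInv (k : Int) (a : List Int) (first : PySem.Dict Int Int)
    (pending : List (Int × Int × Int)) : Prop :=
  (∀ w t, first.get? w = some t → 0 ≤ t ∧ t ≤ (a.length : Int) ∧ TRch k a w t) ∧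
  (∀ p ∈ pending, TRch k a p.1 p.2.1 ∧ 0 ≤ p.2.1 ∧ p.2.2 ≤ (a.length : Int))

lemma bExpand_nil (k : Int) (a : List Int) (v s e : Int) (st : _) (h : e ≤ s) :
    bExpand k a v s e st = st := by
  simp [bExpand, PySem.List.pyRange_one_eq_nil h]

lemma bExpand_cons (k : Int) (a : List Int) (v s e : Int) (st : _) (h : s < e) :
    bExpand k a v s e st = bExpand k a v (s + 1) e (bStep k a v st s) := by
  simp [bExpand, PySem.List.pyRange_one_cons h]

lemma tNeg_nonneg (a : List Int) : 0 ≤ tNeg a := by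
  apply List.sum_nonneg; intro x hx
  simp only [List.mem_map] at hx
  obtain ⟨y, -, rfl⟩ := hx
  split <;> omega

lemma tPos_nonneg (a : List Int) : 0 ≤ tPos a := by
  apply List.sum_nonneg; intro x hx
  simp only [List.mem_map] at hx
  obtain ⟨y, -, rfl⟩ := hx
  split <;> omega

lemma tNeg_append (a b : List Int) : tNeg (a ++ b) = tNeg a + tNeg b := by
  simp [tNeg]

lemma tPos_append (a b : List Int) : tPos (a ++ b) = tPos a + tPos b := by
  simp [tPos]

lemma tNeg_take_mono (a : List Int) {i j : Nat} (h : i ≤ j) :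
    tNeg (a.take i) ≤ tNeg (a.take j) := by
  have : a.take j = a.take i ++ (a.drop i).take (j - i) := by
    rw [← List.take_add]; congr 1; omega
  rw [this, tNeg_append]
  have := tNeg_nonneg ((a.drop i).take (j - i)); omega

lemma tPos_take_mono (a : List Int) {i j : Nat} (h : i ≤ j) :
    tPos (a.take i) ≤ tPos (a.take j) := by
  have : a.take j = a.take i ++ (a.drop i).take (j - i) := by
    rw [← List.take_add]; congr 1; omega
  rw [this, tPos_append]
  have := tPos_nonneg ((a.drop i).take (j - i)); omega

lemma tNeg_take_le (a : List Int) (i : Nat) : tNeg (a.take i) ≤ tNeg a := by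
  have h := tNeg_take_mono a (le_max_left i a.length)
  have : a.take (max i a.length) = a := List.take_of_length_le (le_max_right _ _)
  rw [this] at h; exact h

lemma tPos_take_le (a : List Int) (i : Nat) : tPos (a.take i) ≤ tPos a := by
  have h := tPos_take_mono a (le_max_left i a.length)
  have : a.take (max i a.length) = a := List.take_of_length_le (le_max_right _ _)
  rw [this] at h; exact h

lemma pyGetD_eq_getD (a : List Int) (j : Int) (h0 : 0 ≤ j) :
    PySem.List.pyGetD a j 0 = a.getD j.toNat 0 := by
  obtain ⟨n', rfl⟩ : ∃ n' : Nat, j = (n' : Int) := ⟨j.toNat, by omega⟩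
  rw [PySem.List.pyGetD_natCast]; simp

lemma take_succ_getD (a : List Int) (n : Nat) (h : n < a.length) :
    a.take (n + 1) = a.take n ++ [a.getD n 0] := by
  rw [List.take_succ]
  congr 1
  rw [List.getElem?_eq_getElem h]
  simp [List.getD_eq_getElem?_getD, List.getElem?_eq_getElem h]

-- every chain sum lies in the box [-tNeg, tPos] (prefix-refined, then globalized)
lemma TRch_bounds' {k : Int} {a : List Int} {v s : Int} (h : TRch k a v s) :
    0 ≤ s ∧ s ≤ (a.length : Int) ∧
    -(tNeg (a.take s.toNat)) ≤ v ∧ v ≤ tPos (a.take s.toNat) := by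
  induction h with
  | zero => simp [tNeg, tPos]
  | take v s j hv hs hj hk ih =>
    obtain ⟨h0, hle, hlo, hhi⟩ := ih
    have hj0 : (0:Int) ≤ j := le_trans h0 hs
    have hjn : j.toNat < a.length := by omega
    have hsj : s.toNat ≤ j.toNat := by omega
    have hmlo := tNeg_take_mono a hsj
    have hmhi := tPos_take_mono a hsj
    have hg : PySem.List.pyGetD a j 0 = a.getD j.toNat 0 := pyGetD_eq_getD a j hj0
    have htake : a.take ((j + 1).toNat) = a.take j.toNat ++ [a.getD j.toNat 0] := by
      have : (j + 1).toNat = j.toNat + 1 := by omega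
      rw [this]; exact take_succ_getD a j.toNat hjn
    have hN1 : tNeg (a.take ((j + 1).toNat)) =
        tNeg (a.take j.toNat) + (if a.getD j.toNat 0 < 0 then -(a.getD j.toNat 0) else 0) := by
      rw [htake, tNeg_append]
      simp [tNeg]
    have hP1 : tPos (a.take ((j + 1).toNat)) =
        tPos (a.take j.toNat) + (if 0 < a.getD j.toNat 0 then a.getD j.toNat 0 else 0) := by
      rw [htake, tPos_append]
      simp [tPos]
    rw [hg]
    by_cases hc : a.getD j.toNat 0 < 0
    · rw [if_pos hc] at hN1
      rw [if_neg (by omega)] at hP1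
      refine ⟨by omega, by omega, by omega, by omega⟩
    · rw [if_neg hc] at hN1
      by_cases hc2 : 0 < a.getD j.toNat 0
      · rw [if_pos hc2] at hP1
        refine ⟨by omega, by omega, by omega, by omega⟩
      · rw [if_neg hc2] at hP1
        refine ⟨by omega, by omega, by omega, by omega⟩

lemma TRch_bounds {k : Int} {a : List Int} {v s : Int} (h : TRch k a v s) :
    0 ≤ s ∧ s ≤ (a.length : Int) ∧ -(tNeg a) ≤ v ∧ v ≤ tPos a := by
  obtain ⟨h0, hle, hlo, hhi⟩ := TRch_bounds' h
  have h1 := tNeg_take_le a s.toNat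
  have h2 := tPos_take_le a s.toNat
  exact ⟨h0, hle, by omega, by omega⟩

-- inserting a strictly smaller start index strictly decreases the potential
lemma phiB_insert_lt {a : List Int} (first : PySem.Dict Int Int) {w t : Int}
    (hw : -(tNeg a) ≤ w ∧ w ≤ tPos a) (h0 : 0 ≤ t)
    (hlt : t < first.getD w ((a.length : Int) + 1)) :
    phiB a (first.insert w t) < phiB a first := by
  unfold phiB
  apply List.sum_lt_sum
  · intro x hx
    rw [PySem.Dict.getD_insert]
    split
    · next hxw => subst hxw; omega
    · exact le_rfl
  · refine ⟨w, ?_, ?_⟩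
    · rw [PySem.List.mem_pyRange_one]; omega
    · rw [PySem.Dict.getD_insert, if_pos rfl]; omega

-- core facts about one expansion: keys stay valid, new pushes are valid entries, and the
-- potential pays for every push (termination)
lemma bExpand_basicN (k : Int) (a : List Int) (v s0 e : Int) (hv : TRch k a v s0)
    (h00 : 0 ≤ s0) (he : e ≤ (a.length : Int)) :
    ∀ N : Nat, ∀ s first buf, (e - s).toNat ≤ N → s0 ≤ s →
    (∀ w t, first.get? w = some t → 0 ≤ t ∧ t ≤ (a.length : Int) ∧ TRch k a w t) →
    (∀ w t, (bExpand k a v s e (first, buf)).1.get? w = some t →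
        0 ≤ t ∧ t ≤ (a.length : Int) ∧ TRch k a w t) ∧
    (∀ p ∈ (bExpand k a v s e (first, buf)).2, p ∈ buf ∨
        (TRch k a p.1 p.2.1 ∧ 0 ≤ p.2.1 ∧ p.2.2 ≤ (a.length : Int))) ∧
    (phiB a (bExpand k a v s e (first, buf)).1 + (bExpand k a v s e (first, buf)).2.length
       ≤ phiB a first + buf.length) := by
  intro N
  induction N with
  | zero =>
    intro s first buf hN hs hK
    have hse : e ≤ s := by omega
    rw [bExpand_nil k a v s e _ hse]
    exact ⟨hK, fun p hp => Or.inl hp, le_rfl⟩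
  | succ N ih =>
    intro s first buf hN hs hK
    by_cases hse : e ≤ s
    · rw [bExpand_nil k a v s e _ hse]
      exact ⟨hK, fun p hp => Or.inl hp, le_rfl⟩
    · have hlt : s < e := lt_of_not_ge hse
      rw [bExpand_cons k a v s e _ hlt]
      have hN' : (e - (s + 1)).toNat ≤ N := by omega
      have hs' : s0 ≤ s + 1 := by omega
      -- analyze the step
      unfold bStep
      set w := v + PySem.List.pyGetD a s 0 with hw
      by_cases hwk : w ≤ k
      · rw [if_pos hwk]
        set old := first.getD w ((a.length : Int) + 1) with hold
        by_cases himp : s + 1 < old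
        · rw [if_pos himp]
          simp only
          -- the pushed sum is a valid chain sum
          have hTw : TRch k a w (s + 1) :=
            TRch.take v s0 s hv hs (by omega) hwk
          have hbox := TRch_bounds hTw
          have hK' : ∀ w' t, (first.insert w (s+1)).get? w' = some t →
              0 ≤ t ∧ t ≤ (a.length : Int) ∧ TRch k a w' t := by
            intro w' t hget
            rw [PySem.Dict.get?_insert] at hget
            split at hget
            · next heq =>
              cases hget; subst heq
              exact ⟨by omega, by omega, hTw⟩
            · exact hK w' t hget
          have hphi : phiB a (first.insert w (s+1)) < phiB a first :=
            phiB_insert_lt first ⟨hbox.2.2.1, hbox.2.2.2⟩ (by omega) himp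
          obtain ⟨c1, c2, c3⟩ := ih (s+1) (first.insert w (s+1))
            (buf ++ [(w, s+1, if old ≤ (a.length : Int) then old else (a.length : Int))])
            hN' hs' hK'
          refine ⟨c1, ?_, ?_⟩
          · intro p hp
            rcases c2 p hp with hc | hc
            · rcases List.mem_append.mp hc with h1 | h2
              · exact Or.inl h1
              · simp only [List.mem_singleton] at h2
                subst h2
                refine Or.inr ⟨hTw, show (0:Int) ≤ s + 1 by omega,
                  show (if old ≤ (a.length : Int) then old else (a.length : Int)) ≤ (a.length : Int) by
                    split <;> omega⟩
            · exact Or.inr hc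
          · simp only [List.length_append, List.length_cons, List.length_nil] at c3
            omega
        · rw [if_neg himp]
          exact ih (s+1) first buf hN' hs' hK
      · rw [if_neg hwk]
        exact ih (s+1) first buf hN' hs' hK

lemma bExpand_basic (k : Int) (a : List Int) (v s e : Int) (first : PySem.Dict Int Int)
    (buf : List (Int × Int × Int)) (hv : TRch k a v s) (h0 : 0 ≤ s)
    (he : e ≤ (a.length : Int))
    (hK : ∀ w t, first.get? w = some t → 0 ≤ t ∧ t ≤ (a.length : Int) ∧ TRch k a w t) :
    (∀ w t, (bExpand k a v s e (first, buf)).1.get? w = some t →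
        0 ≤ t ∧ t ≤ (a.length : Int) ∧ TRch k a w t) ∧
    (∀ p ∈ (bExpand k a v s e (first, buf)).2, p ∈ buf ∨
        (TRch k a p.1 p.2.1 ∧ 0 ≤ p.2.1 ∧ p.2.2 ≤ (a.length : Int))) ∧
    (phiB a (bExpand k a v s e (first, buf)).1 + (bExpand k a v s e (first, buf)).2.length
       ≤ phiB a first + buf.length) :=
  bExpand_basicN k a v s e hv h0 he (e - s).toNat s first buf le_rfl le_rfl hK

-- the `while head < len(todo)` loop of Source B; `pending` is todo[head:], pushes append at the end
def bLoop (k : Int) (a : List Int) (first : PySem.Dict Int Int)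
    (pending : List (Int × Int × Int)) (best : Int)
    (h : BInv k a first pending) : Int :=
  match pending with
  | [] => best
  | (v, s, e) :: rest =>
      let best' := if best < v then v else best
      let fb := bExpand k a v s e (first, [])
      bLoop k a fb.1 (rest ++ fb.2) best'
        (by
          have hh := h.2 (v, s, e) List.mem_cons_self
          have hb := bExpand_basic k a v s e first [] hh.1 hh.2.1 hh.2.2 h.1
          refine ⟨hb.1, ?_⟩
          intro p hpmem
          rcases List.mem_append.mp hpmem with hp1 | hp2
          · exact h.2 p (List.mem_cons_of_mem _ hp1)
          · rcases hb.2.1 p hp2 with hc | hc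
            · exact absurd hc (List.not_mem_nil)
            · exact hc)
termination_by phiB a first + pending.length
decreasing_by
  have hh := h.2 (v, s, e) List.mem_cons_self
  have hb := bExpand_basic k a v s e first [] hh.1 hh.2.1 hh.2.2 h.1
  have := hb.2.2
  simp only [List.length_append, List.length_cons, List.length_nil] at *
  omega

-- port of Source B: first = {0: 0}, todo = [(0, 0, m)], head = 0, best = 0
def subset_sum_bfs_pruned_alt (n : Int) (k : Int) (a : List Int) : Int :=
  bLoop k a (PySem.Dict.ofList [(0, 0)]) [(0, 0, (a.length : Int))] 0
    (by
      constructor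
      · intro w t hw
        rw [show PySem.Dict.ofList [((0:Int), (0:Int))] = PySem.Dict.empty.insert 0 0 from rfl,
          PySem.Dict.get?_insert] at hw
        split at hw
        · next heq =>
          cases hw; subst heq
          exact ⟨le_rfl, Int.natCast_nonneg _, TRch.zero⟩
        · rw [PySem.Dict.get?_empty] at hw; cases hw
      · intro p hp
        simp only [List.mem_singleton] at hp
        subst hp
        exact ⟨TRch.zero, le_rfl, le_rfl⟩)

-- ===== PRECONDITION & SPEC =====
def Spec_subset_sum_bfs_pruned (n : Int) (k : Int) (a : List Int) (out : Int) : Prop := out = subset_sum_bfs_pruned_alt n k a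
instance (n : Int) (k : Int) (a : List Int) (out : Int) : Decidable (Spec_subset_sum_bfs_pruned n k a out) := by unfold Spec_subset_sum_bfs_pruned; infer_instance

-- ===== CLAIM (what is proved, stated in full; the proofs are below) =====
def Claim_equal_subset_sum_bfs_pruned : Prop := ∀ (n : Int) (k : Int) (a : List Int), Dom_subset_sum_bfs_pruned n k a → Spec_subset_sum_bfs_pruned n k a (subset_sum_bfs_pruned n k a)

-- ===== LEMMAS AND PROOFS =====

-- A's loop body as a named function (definitionally the port's fold step)
def stepA (k : Int) (current : PySem.Set Int) (num : Int) : PySem.Set Int :=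
  let next_layer : PySem.Set Int :=
    current.foldl (fun nl val =>
      let new_val := val + num
      if new_val ≤ k then PySem.Set.add nl new_val else nl) PySem.Set.empty
  PySem.Set.union current next_layer

lemma mem_stepA (k : Int) (s : PySem.Set Int) (num x : Int) :
    x ∈ stepA k s num ↔ x ∈ s ∨ ∃ v ∈ s, v + num ≤ k ∧ x = v + num := by
  unfold stepA
  rw [PySem.Set.mem_union]
  have : (s.foldl (fun nl val =>
      let new_val := val + num
      if new_val ≤ k then PySem.Set.add nl new_val else nl) PySem.Set.empty)
      = ((s.filter fun val => decide (val + num ≤ k)).foldl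
          (fun nl val => PySem.Set.add nl (val + num)) PySem.Set.empty) := by
    simpa using PySem.List.foldl_ite_eq_foldl_filter
      (p := fun val => val + num ≤ k)
      (f := fun nl val => PySem.Set.add nl (val + num)) (l := s) (init := PySem.Set.empty)
  rw [this, PySem.Set.mem_foldl_add]
  simp [PySem.Set.empty, List.mem_filter]
  tauto

lemma TRch_inv {k : Int} {a : List Int} {x s : Int} (h : TRch k a x s) :
    (x = 0 ∧ s = 0) ∨
    ∃ v s0 j, TRch k a v s0 ∧ s0 ≤ j ∧ j + 1 ≤ (a.length : Int) ∧
      v + PySem.List.pyGetD a j 0 ≤ k ∧ x = v + PySem.List.pyGetD a j 0 ∧ s = j + 1 := by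
  cases h with
  | zero => exact Or.inl ⟨rfl, rfl⟩
  | take v s0 j hv hs hj hk => exact Or.inr ⟨v, s0, j, hv, hs, hj, hk, rfl, rfl⟩

lemma TRch_zero_inv {k : Int} {a : List Int} {x : Int} (h : TRch k a x 0) : x = 0 := by
  rcases TRch_inv h with ⟨hx, _⟩ | ⟨v, s0, j, hv, hs, hj, hk, hx, hs0⟩
  · exact hx
  · exfalso
    have := (TRch_bounds hv).1
    omega

-- A's current after i elements = chain sums whose last take ends at an index ≤ i
lemma mem_foldA {k : Int} {a : List Int} :
    ∀ i : Nat, i ≤ a.length → ∀ x : Int,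
      (x ∈ (a.take i).foldl (stepA k) (PySem.Set.ofList [0])) ↔
        ∃ s, TRch k a x s ∧ s ≤ (i : Int) := by
  intro i
  induction i with
  | zero =>
    intro _ x
    simp only [List.take_zero, List.foldl_nil]
    constructor
    · intro hx
      have : x = 0 := by simpa [PySem.Set.mem_ofList] using hx
      exact ⟨0, by rw [this]; exact TRch.zero, le_rfl⟩
    · rintro ⟨s, hTR, hs⟩
      have h0 := (TRch_bounds hTR).1
      have : s = 0 := by omega
      subst this
      have := TRch_zero_inv hTR
      simpa [PySem.Set.mem_ofList, this]
  | succ i ih =>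
    intro hi x
    have hlt : i < a.length := by omega
    have htake : a.take (i + 1) = a.take i ++ [a.getD i 0] := take_succ_getD a i hlt
    rw [htake, List.foldl_append]
    simp only [List.foldl_cons, List.foldl_nil]
    rw [mem_stepA]
    have hg : PySem.List.pyGetD a (i : Int) 0 = a.getD ((i : Int)).toNat 0 :=
      pyGetD_eq_getD a (i : Int) (by omega)
    have hg' : a.getD i 0 = PySem.List.pyGetD a (i : Int) 0 := by
      rw [hg]; simp
    constructor
    · rintro (hx | ⟨v, hv, hle, rfl⟩)
      · obtain ⟨sx, hTR, hs⟩ := (ih (by omega) x).mp hx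
        exact ⟨sx, hTR, by omega⟩
      · obtain ⟨sv, hTR, hs⟩ := (ih (by omega) v).mp hv
        rw [hg']
        refine ⟨(i : Int) + 1, TRch.take v sv (i : Int) hTR (by omega) (by omega) ?_, by omega⟩
        rw [← hg']; exact hle
    · rintro ⟨sx, hTR, hs⟩
      by_cases hcase : sx ≤ (i : Int)
      · exact Or.inl ((ih (by omega) x).mpr ⟨sx, hTR, hcase⟩)
      · have hsx : sx = (i : Int) + 1 := by omega
        rcases TRch_inv hTR with ⟨_, hz⟩ | ⟨v, s0, j, hv, hs2, hj, hk, hx, hs0⟩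
        · exfalso; omega
        · have hji : j = (i : Int) := by omega
          subst hji hx
          refine Or.inr ⟨v, ?_, ?_, ?_⟩
          · exact (ih (by omega) v).mpr ⟨s0, hv, by have := (TRch_bounds hv).1; omega⟩
          · rw [hg']; exact hk
          · rw [hg']

-- `Cl first w j`: taking element j from sum w is already recorded in the dict
def Cl (k : Int) (a : List Int) (first : PySem.Dict Int Int) (w j : Int) : Prop :=
  w + PySem.List.pyGetD a j 0 ≤ k →
    ∃ t', first.get? (w + PySem.List.pyGetD a j 0) = some t' ∧ t' ≤ j + 1

lemma Cl_mono {k : Int} {a : List Int} {f f' : PySem.Dict Int Int} {w j : Int}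
    (hmono : ∀ w t, f.get? w = some t → ∃ t', f'.get? w = some t' ∧ t' ≤ t)
    (h : Cl k a f w j) : Cl k a f' w j := by
  intro hk
  obtain ⟨t', hget, hle⟩ := h hk
  obtain ⟨t'', hget', hle'⟩ := hmono _ _ hget
  exact ⟨t'', hget', by omega⟩

-- full correctness invariant of B's main loop
def CFull (k : Int) (a : List Int) (first : PySem.Dict Int Int)
    (pending : List (Int × Int × Int)) (best : Int) : Prop :=
  first.get? 0 = some 0 ∧
  (∀ w t, first.get? w = some t → ∀ j, t ≤ j → j < (a.length : Int) →
      (∃ p ∈ pending, p.1 = w ∧ p.2.1 ≤ j ∧ j < p.2.2) ∨ Cl k a first w j) ∧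
  (∃ s, TRch k a best s) ∧
  (∀ w t, first.get? w = some t → w ≤ best ∨ ∃ p ∈ pending, p.1 = w)

-- strong description of one expansion, relative to the scan-start dict
lemma bExpand_strong_aux (k : Int) (a : List Int) (v e : Int) (he : e ≤ (a.length : Int)) :
    ∀ N : Nat, ∀ s first buf, (e - s).toNat ≤ N → 0 ≤ s →
    -- S1: scan-start keys persist with equal-or-smaller values
    ((∀ w t, first.get? w = some t →
        ∃ t', (bExpand k a v s e (first, buf)).1.get? w = some t' ∧ t' ≤ t) ∧
    -- S2': coverage of every final key, relative to final pushes / final dict / scan-start keys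
    (∀ w t', (bExpand k a v s e (first, buf)).1.get? w = some t' →
        ∀ j, t' ≤ j → j < (a.length : Int) →
          (∃ p ∈ (bExpand k a v s e (first, buf)).2, p.1 = w ∧ p.2.1 ≤ j ∧ j < p.2.2) ∨
          Cl k a (bExpand k a v s e (first, buf)).1 w j ∨
          (∃ t0, first.get? w = some t0 ∧ t0 ≤ j)) ∧
    -- S3: every scanned index is closed for v in the final dict
    (∀ j, s ≤ j → j < e → Cl k a (bExpand k a v s e (first, buf)).1 v j) ∧
    -- S4: every final key is a scan-start key or has a push
    (∀ w t', (bExpand k a v s e (first, buf)).1.get? w = some t' →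
        first.get? w = some t' ∨ ∃ p ∈ (bExpand k a v s e (first, buf)).2, p.1 = w) ∧
    -- S5: buffered pushes persist
    (∀ p ∈ buf, p ∈ (bExpand k a v s e (first, buf)).2)) := by
  intro N
  induction N with
  | zero =>
    intro s first buf hN h0
    have hse : e ≤ s := by omega
    rw [bExpand_nil k a v s e _ hse]
    refine ⟨fun w t h => ⟨t, h, le_rfl⟩, ?_, ?_, fun w t' h => Or.inl h, fun p hp => hp⟩
    · intro w t' h j hj hjl
      exact Or.inr (Or.inr ⟨t', h, hj⟩)
    · intro j hj1 hj2; omega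
  | succ N ih =>
    intro s first buf hN h0
    by_cases hse : e ≤ s
    · rw [bExpand_nil k a v s e _ hse]
      refine ⟨fun w t h => ⟨t, h, le_rfl⟩, ?_, ?_, fun w t' h => Or.inl h, fun p hp => hp⟩
      · intro w t' h j hj hjl
        exact Or.inr (Or.inr ⟨t', h, hj⟩)
      · intro j hj1 hj2; omega
    · have hlt : s < e := lt_of_not_ge hse
      rw [bExpand_cons k a v s e _ hlt]
      have hN' : (e - (s + 1)).toNat ≤ N := by omega
      have h0' : (0:Int) ≤ s + 1 := by omega
      unfold bStep
      set w0 := v + PySem.List.pyGetD a s 0 with hw0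
      by_cases hwk : w0 ≤ k
      · rw [if_pos hwk]
        set old := first.getD w0 ((a.length : Int) + 1) with hold
        by_cases himp : s + 1 < old
        · rw [if_pos himp]
          simp only
          set f1 := first.insert w0 (s + 1) with hf1
          set ent : Int × Int × Int :=
            (w0, s + 1, if old ≤ (a.length : Int) then old else (a.length : Int)) with hent
          obtain ⟨i1, i2, i3, i4, i5⟩ := ih (s+1) f1 (buf ++ [ent]) hN' h0'
          have hentmem : ent ∈ (bExpand k a v (s+1) e (f1, buf ++ [ent])).2 :=
            i5 ent (List.mem_append.mpr (Or.inr (List.mem_singleton.mpr rfl)))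
          have hget_f1 : ∀ x, f1.get? x = if x = w0 then some (s+1) else first.get? x := by
            intro x; rw [hf1, PySem.Dict.get?_insert]
          refine ⟨?_, ?_, ?_, ?_, ?_⟩
          · -- S1
            intro w t hget
            by_cases hxw : w = w0
            · subst hxw
              have hval : first.getD w0 ((a.length : Int) + 1) = t := by
                rw [PySem.Dict.getD_eq_get?_getD, hget]; rfl
              obtain ⟨t', hg', hle'⟩ := i1 w0 (s+1) (by rw [hget_f1]; simp)
              exact ⟨t', hg', by omega⟩
            · obtain ⟨t', hg', hle'⟩ := i1 w t (by rw [hget_f1, if_neg hxw]; exact hget)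
              exact ⟨t', hg', hle'⟩
          · -- S2'
            intro w t' hget j hj hjl
            rcases i2 w t' hget j hj hjl with hc | hc | ⟨t0, ht0, ht0le⟩
            · exact Or.inl hc
            · exact Or.inr (Or.inl hc)
            · rw [hget_f1] at ht0
              split at ht0
              · next hxw =>
                subst hxw
                cases ht0
                -- w = w0, t0 = s+1 ≤ j: use the fresh entry, its tail, or the pre-key at old
                by_cases hjent : j < ent.2.2
                · exact Or.inl ⟨ent, hentmem, rfl, ht0le, hjent⟩
                · have holdm : old ≤ (a.length : Int) := by
                    by_contra hno
                    have : ent.2.2 = (a.length : Int) := by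
                      simp only [hent]; rw [if_neg hno]
                    omega
                  have : ent.2.2 = old := by simp only [hent]; rw [if_pos holdm]
                  have hkey : first.get? w0 = some old := by
                    rcases hG : first.get? w0 with _ | t1
                    · exfalso
                      have : first.getD w0 ((a.length : Int) + 1) = (a.length : Int) + 1 :=
                        PySem.Dict.getD_of_get?_eq_none _ _ hG
                      omega
                    · have : first.getD w0 ((a.length : Int) + 1) = t1 :=
                        PySem.Dict.getD_of_get?_eq_some _ _ hG
                      rw [hold, this]
                  exact Or.inr (Or.inr ⟨old, hkey, by omega⟩)
              · exact Or.inr (Or.inr ⟨t0, ht0, ht0le⟩)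
          · -- S3
            intro j hj1 hj2
            by_cases hjs : j = s
            · intro hk2
              rw [hjs] at hk2 ⊢
              obtain ⟨t', hg', hle'⟩ := i1 w0 (s+1) (by rw [hget_f1]; simp)
              exact ⟨t', by rw [← hw0]; exact hg', by omega⟩
            · exact i3 j (by omega) hj2
          · -- S4
            intro w t' hget
            rcases i4 w t' hget with hc | hc
            · rw [hget_f1] at hc
              split at hc
              · next hxw => exact Or.inr ⟨ent, hentmem, by rw [hent, hxw]⟩
              · exact Or.inl hc
            · exact Or.inr hc
          · -- S5
            intro p hp
            exact i5 p (List.mem_append.mpr (Or.inl hp))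
        · rw [if_neg himp]
          have hnoimp : old ≤ s + 1 := by omega
          obtain ⟨i1, i2, i3, i4, i5⟩ := ih (s+1) first buf hN' h0'
          refine ⟨i1, ?_, ?_, i4, i5⟩
          · intro w t' hget j hj hjl
            exact i2 w t' hget j hj hjl
          · -- S3: index s is closed because the dict already had a value ≤ s+1 at w0
            intro j hj1 hj2
            by_cases hjs : j = s
            · intro hk2
              rw [hjs] at hk2 ⊢
              have hkey : first.get? w0 = some old := by
                rcases hG : first.get? w0 with _ | t1
                · exfalso
                  have : first.getD w0 ((a.length : Int) + 1) = (a.length : Int) + 1 :=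
                    PySem.Dict.getD_of_get?_eq_none _ _ hG
                  omega
                · have : first.getD w0 ((a.length : Int) + 1) = t1 :=
                    PySem.Dict.getD_of_get?_eq_some _ _ hG
                  rw [hold, this]
              obtain ⟨t', hg', hle'⟩ := i1 w0 old hkey
              exact ⟨t', by rw [← hw0]; exact hg', by omega⟩
            · exact i3 j (by omega) hj2
      · rw [if_neg hwk]
        obtain ⟨i1, i2, i3, i4, i5⟩ := ih (s+1) first buf hN' h0'
        refine ⟨i1, i2, ?_, i4, i5⟩
        intro j hj1 hj2
        by_cases hjs : j = s
        · intro hk2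
          rw [hjs] at hk2
          exact absurd hk2 (by rw [← hw0]; exact hwk)
        · exact i3 j (by omega) hj2

-- one step of the main loop preserves the correctness invariant
lemma CFull_step (k : Int) (a : List Int) (first : PySem.Dict Int Int)
    (v s e : Int) (rest : List (Int × Int × Int)) (best : Int)
    (hB : BInv k a first ((v, s, e) :: rest))
    (hC : CFull k a first ((v, s, e) :: rest) best) :
    CFull k a (bExpand k a v s e (first, [])).1
      (rest ++ (bExpand k a v s e (first, [])).2)
      (if best < v then v else best) := by
  obtain ⟨c2, c3, c4, c5⟩ := hC
  have hh := hB.2 (v, s, e) List.mem_cons_self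
  have hbasic := bExpand_basic k a v s e first [] hh.1 hh.2.1 hh.2.2 hB.1
  obtain ⟨s1, s2, s3, s4, s5⟩ :=
    bExpand_strong_aux k a v e hh.2.2 (e - s).toNat s first [] le_rfl hh.2.1
  set fb := bExpand k a v s e (first, []) with hfb
  refine ⟨?_, ?_, ?_, ?_⟩
  · -- C2: key 0 keeps value 0
    obtain ⟨t', hg', hle'⟩ := s1 0 0 c2
    have h0t := (hbasic.1 0 t' hg').1
    have ht0 : t' = 0 := by omega
    subst ht0
    exact hg'
  · -- C3: coverage
    intro w t hget j hj hjl
    rcases s2 w t hget j hj hjl with hc | hc | ⟨t0, ht0, ht0le⟩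
    · obtain ⟨p, hp, hpw, hp1, hp2⟩ := hc
      exact Or.inl ⟨p, List.mem_append.mpr (Or.inr hp), hpw, hp1, hp2⟩
    · exact Or.inr hc
    · -- defer to the pre-state coverage of key w at t0
      rcases c3 w t0 ht0 j ht0le hjl with ⟨p, hp, hpw, hp1, hp2⟩ | hcl
      · rcases List.mem_cons.mp hp with hphead | hprest
        · -- the covering entry is the popped one: w = v and j lies in the scanned segment
          subst hphead
          simp only at hpw hp1 hp2
          rw [← hpw]
          exact Or.inr (s3 j hp1 hp2)
        · exact Or.inl ⟨p, List.mem_append.mpr (Or.inl hprest), hpw, hp1, hp2⟩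
      · exact Or.inr (Cl_mono s1 hcl)
  · -- C4: best' is a chain sum
    split
    · exact ⟨s, hh.1⟩
    · exact c4
  · -- C5: every key is counted or pending
    intro w t hget
    rcases s4 w t hget with hpre | ⟨p, hp, hpw⟩
    · rcases c5 w t hpre with hle | ⟨p, hp, hpw⟩
      · left; split <;> omega
      · rcases List.mem_cons.mp hp with hphead | hprest
        · subst hphead
          simp only at hpw
          left; rw [← hpw]; split <;> omega
        · exact Or.inr ⟨p, List.mem_append.mpr (Or.inl hprest), hpw⟩
    · exact Or.inr ⟨p, List.mem_append.mpr (Or.inr hp), hpw⟩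

-- at the end of the loop the dict reaches every chain sum with a minimal start
lemma CFull_final (k : Int) (a : List Int) (first : PySem.Dict Int Int) (best : Int)
    (hC : CFull k a first [] best) :
    (∃ s, TRch k a best s) ∧ (∀ w t, TRch k a w t → w ≤ best) := by
  obtain ⟨c2, c3, c4, c5⟩ := hC
  refine ⟨c4, ?_⟩
  have hreach : ∀ w t, TRch k a w t → ∃ t', first.get? w = some t' ∧ t' ≤ t := by
    intro w t h
    induction h with
    | zero => exact ⟨0, c2, le_rfl⟩
    | take v s j hv hs hj hk ih =>
      obtain ⟨t', hget, hle⟩ := ih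
      rcases c3 v t' hget j (by omega) (by omega) with ⟨p, hp, _⟩ | hcl
      · exact absurd hp (List.not_mem_nil)
      · obtain ⟨t2, hget2, hle2⟩ := hcl hk
        exact ⟨t2, hget2, hle2⟩
  intro w t h
  obtain ⟨t', hget, _⟩ := hreach w t h
  rcases c5 w t' hget with hle | ⟨p, hp, _⟩
  · exact hle
  · exact absurd hp (List.not_mem_nil)

-- the loop's result is exactly the maximum reachable chain sum
lemma bLoop_correct (k : Int) (a : List Int) (first : PySem.Dict Int Int)
    (pending : List (Int × Int × Int)) (best : Int) (h : BInv k a first pending)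
    (hC : CFull k a first pending best) :
    (∃ s, TRch k a (bLoop k a first pending best h) s) ∧
    (∀ w t, TRch k a w t → w ≤ bLoop k a first pending best h) := by
  fun_induction bLoop with
  | case1 k a first best =>
    exact CFull_final _ _ _ _ hC
  | case2 first best v s e rest h best' fb h2 ih =>
    exact ih (CFull_step k a first v s e rest best h hC)

-- ===== VERDICT (by name: the statement is the Claim_ definition above) =====
theorem subset_sum_bfs_pruned_spec : Claim_equal_subset_sum_bfs_pruned := by
  intro n k a _
  unfold Spec_subset_sum_bfs_pruned
  unfold subset_sum_bfs_pruned subset_sum_bfs_pruned_alt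
  -- characterize A's final set
  have hchar : ∀ x : Int,
      (x ∈ a.foldl (stepA k) (PySem.Set.ofList [0])) ↔ ∃ s, TRch k a x s := by
    intro x
    have := mem_foldA (k := k) (a := a) a.length le_rfl x
    rw [List.take_of_length_le le_rfl] at this
    rw [this]
    constructor
    · rintro ⟨s, hTR, _⟩; exact ⟨s, hTR⟩
    · rintro ⟨s, hTR⟩; exact ⟨s, hTR, (TRch_bounds hTR).2.1⟩
  set cur := a.foldl (stepA k) (PySem.Set.ofList [0]) with hcur
  have hA : (a.foldl (fun current num =>
      let next_layer : PySem.Set Int :=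
        current.foldl (fun nl val =>
          let new_val := val + num
          if new_val ≤ k then PySem.Set.add nl new_val else nl) PySem.Set.empty
      PySem.Set.union current next_layer) (PySem.Set.ofList [0])) = cur := by
    rw [hcur]; rfl
  rw [hA]
  show (PySem.List.max? cur (fun x => x)).getD 0 = _
  -- B's result
  have hB := bLoop_correct k a (PySem.Dict.ofList [(0, 0)]) [(0, 0, (a.length : Int))] 0
    (by
      constructor
      · intro w t hw
        rw [show PySem.Dict.ofList [((0:Int), (0:Int))] = PySem.Dict.empty.insert 0 0 from rfl,
          PySem.Dict.get?_insert] at hw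
        split at hw
        · next heq =>
          cases hw; subst heq
          exact ⟨le_rfl, Int.natCast_nonneg _, TRch.zero⟩
        · rw [PySem.Dict.get?_empty] at hw; cases hw
      · intro p hp
        simp only [List.mem_singleton] at hp
        subst hp
        exact ⟨TRch.zero, le_rfl, le_rfl⟩)
    (by
      have hget0 : (PySem.Dict.ofList [((0:Int), (0:Int))]).get? 0 = some 0 := by
        rw [show PySem.Dict.ofList [((0:Int), (0:Int))] = PySem.Dict.empty.insert 0 0 from rfl,
          PySem.Dict.get?_insert]
        simp
      refine ⟨hget0, ?_, ⟨0, TRch.zero⟩, ?_⟩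
      · intro w t hw j hj hjl
        rw [show PySem.Dict.ofList [((0:Int), (0:Int))] = PySem.Dict.empty.insert 0 0 from rfl,
          PySem.Dict.get?_insert] at hw
        split at hw
        · next heq =>
          cases hw; subst heq
          exact Or.inl ⟨(0, 0, (a.length : Int)), List.mem_singleton.mpr rfl, rfl, hj, hjl⟩
        · rw [PySem.Dict.get?_empty] at hw; cases hw
      · intro w t hw
        rw [show PySem.Dict.ofList [((0:Int), (0:Int))] = PySem.Dict.empty.insert 0 0 from rfl,
          PySem.Dict.get?_insert] at hw
        split at hw
        · next heq =>
          exact Or.inr ⟨(0, 0, (a.length : Int)), List.mem_singleton.mpr rfl, heq.symm⟩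
        · rw [PySem.Dict.get?_empty] at hw; cases hw)
  set bout := bLoop k a (PySem.Dict.ofList [(0, 0)]) [(0, 0, (a.length : Int))] 0 _ with hbout
  obtain ⟨⟨sb, hTRb⟩, hmaxb⟩ := hB
  -- A's max over the nonempty set cur
  have h0cur : (0:Int) ∈ cur := (hchar 0).mpr ⟨0, TRch.zero⟩
  have hne : cur ≠ [] := by
    intro hnil; rw [hnil] at h0cur; exact List.not_mem_nil h0cur
  obtain ⟨mA, hmA⟩ : ∃ mA, PySem.List.max? cur (fun x => x) = some mA := by
    cases hmx : PySem.List.max? cur (fun x => x) with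
    | none => exact absurd ((PySem.List.max?_eq_none_iff cur (fun x => x)).mp hmx) hne
    | some mA => exact ⟨mA, rfl⟩
  rw [hmA]
  simp only [Option.getD_some]
  have hmem : mA ∈ cur := PySem.List.max?_mem hmA
  have hismax : ∀ y ∈ cur, y ≤ mA := fun y hy => PySem.List.max?_isMax hmA y hy
  -- antisymmetry
  obtain ⟨sA, hTRA⟩ := (hchar mA).mp hmem
  have h1 : mA ≤ bout := hmaxb mA sA hTRA
  have h2 : bout ≤ mA := hismax bout ((hchar bout).mpr ⟨sb, hTRb⟩)
  omega
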